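-- pv_equiv track=rewrite | github.com/LMP-dev/AdventOfCode | 2023/day_13/puzzleB.py | find_row_symmetry
-- ===== SOURCE A (Python) =====
-- import math
--
-- def check_symmetry_between_rows(
--     start_row: int, end_row: int, pattern: list[list[str]]
-- ) -> int | None:
--     mirror_area = pattern[start_row : end_row + 1]
--     if len(mirror_area) % 2 != 0:
--         return None
--     # for loop poping first and last elements and checking they are equal!
--     while mirror_area:
--         last_row = mirror_area.pop()
--         first_row = mirror_area.pop(0)
--         if first_row != last_row:
--             return None
--     difference = end_row - start_row
--     lower_row = start_row + math.floor(difference / 2)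
--
--     return lower_row + 1  # Problem rows start at 1 not at 0
--
-- def find_row_symmetry(pattern: list[list[str]], old_symmetry: int = None) -> int | None:
--     sym_row = None
--     max_index = len(pattern) - 1
--     # Check horizontal symmetry
--     for line in pattern:
--         if sym_row:
--             break
--         count = pattern.count(line)
--         if count == 1:
--             continue
--         else:
--             indices = [i for i, val in enumerate(pattern) if val == line]
--             # Not in one of the edges of the pattern
--             if not (0 in indices or max_index in indices):
--                 continue
--             # First match is in edge of pattern
--             if indices[0] == 0:
--                 for index in indices[1:]:
--                     row = check_symmetry_between_rows(0, index, pattern)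
--                     if row:
--                         if not row == old_symmetry:
--                             sym_row = row
--                             break
--             # Last match is in edge of pattern
--             if indices[-1] == max_index:
--                 for index in indices[:-1]:
--                     row = check_symmetry_between_rows(index, max_index, pattern)
--                     if row:
--                         if not row == old_symmetry:
--                             sym_row = row
--                             break
--
--     return sym_row
-- ===== SOURCE B (Python) =====
-- def find_row_symmetry(pattern: list[list[str]], old_symmetry: int = None) -> int | None:
--     # Scan each candidate mirror position p directly and return the first one
--     # whose reflection holds (and which is not the previously known line).
--     n = len(pattern)
--     for p in range(1, n):
--         if p == old_symmetry:
--             continue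
--         if all(pattern[p - 1 - k] == pattern[p + k] for k in range(min(p, n - p))):
--             return p
--     return None
-- ===== Notes on version B (the rewrite author's own statement) =====
-- stated objective: simpler
-- what changed: Replaces A's duplicate-row bookkeeping (list.count, enumerate-built index lists, pop-based palindrome checks anchored at the edges, nested inner loops) by a single direct scan of candidate mirror positions p, checking min(p, n-p) row pairs per position.
-- intended difference: On patterns whose first and last rows are equal and that admit both a top-anchored reflection strictly above the middle and a bottom-anchored reflection (each different from old_symmetry), A's bottom-edge scan accidentally overwrites the already-found smaller top reflection and returns the bottom one, while B returns the smallest valid reflection line, which is the intended first match. — e.g. on find_row_symmetry([["a"], ["a"], ["a"], ["b"], ["b"], ["a"]], none): A returns some 4, B returns some 1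
import Mathlib
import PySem

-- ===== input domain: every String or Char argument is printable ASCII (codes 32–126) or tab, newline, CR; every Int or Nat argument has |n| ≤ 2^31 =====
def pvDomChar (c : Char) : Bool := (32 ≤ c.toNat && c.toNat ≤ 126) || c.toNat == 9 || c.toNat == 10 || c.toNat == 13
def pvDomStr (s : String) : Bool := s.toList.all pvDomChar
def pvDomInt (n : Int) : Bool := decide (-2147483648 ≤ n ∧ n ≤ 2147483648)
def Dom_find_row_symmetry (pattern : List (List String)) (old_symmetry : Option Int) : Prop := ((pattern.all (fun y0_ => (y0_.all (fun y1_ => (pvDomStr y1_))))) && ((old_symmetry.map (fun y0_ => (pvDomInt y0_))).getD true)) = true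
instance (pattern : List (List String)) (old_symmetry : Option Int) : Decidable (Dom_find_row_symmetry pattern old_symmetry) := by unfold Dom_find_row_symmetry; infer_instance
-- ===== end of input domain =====

-- B replaces A's duplicate-row bookkeeping (count/enumerate index lists, edge-anchored pop-based
-- palindrome checks in two inner loops) by one direct scan of candidate mirror positions;
-- on the D_ corner below A and B intentionally differ (see the sentence above D_).

-- ===== PORT A =====

-- the `while mirror_area:` pop/pop(0) loop of check_symmetry_between_rows;
-- fuel = initial length makes the recursion structural and is never exhausted.
-- The `[_]` (and fuel-0) branches are unreachable under the even-length guard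
-- (Python would raise IndexError on pop(0) of the emptied list there).
def pvPairLoopF : Nat → List (List String) → Bool
  | _, [] => true
  | 0, _ :: _ => false
  | _ + 1, [_] => false
  | f + 1, x :: y :: ys =>
    if x ≠ (y :: ys).getLast (by simp) then false
    else pvPairLoopF f ((y :: ys).dropLast)

def check_symmetry_between_rows (start_row end_row : Int) (pattern : List (List String)) : Option Int :=
  let mirror_area := PySem.List.slice pattern (some start_row) (some (end_row + 1))
  if PySem.Int.mod (PySem.List.len mirror_area) 2 ≠ 0 then none
  else if pvPairLoopF mirror_area.length mirror_area then
    let difference := end_row - start_row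
    -- math.floor(difference / 2) is exact integer floor division on this domain
    let lower_row := start_row + PySem.Int.floordiv difference 2
    some (lower_row + 1)
  else none

-- Python truthiness of sym_row / row (an Optional[int])
def pvTruthy (o : Option Int) : Bool := match o with | some v => v != 0 | none => false

-- `for index in indices[1:]: row = check(0, index); if row: if not row == old: sym_row = row; break`
def pvTopLoop (pattern : List (List String)) (old : Option Int) : List Int → Option Int → Option Int
  | [], sym => sym
  | i :: rest, sym =>
    let row := check_symmetry_between_rows 0 i pattern
    if pvTruthy row then
      if row == old then pvTopLoop pattern old rest sym else row
    else pvTopLoop pattern old rest sym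

-- `for index in indices[:-1]: row = check(index, max_index); …`
def pvBotLoop (pattern : List (List String)) (old : Option Int) (maxIdx : Int) : List Int → Option Int → Option Int
  | [], sym => sym
  | i :: rest, sym =>
    let row := check_symmetry_between_rows i maxIdx pattern
    if pvTruthy row then
      if row == old then pvBotLoop pattern old maxIdx rest sym else row
    else pvBotLoop pattern old maxIdx rest sym

-- `[i for i, val in enumerate(pattern) if val == line]`
def pvIndices (pattern : List (List String)) (line : List String) : List Int :=
  (PySem.List.enumerate pattern 0).filterMap (fun iv => if iv.2 == line then some iv.1 else none)

-- one iteration body of the `for line in pattern` loop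
def pvBody (pattern : List (List String)) (old : Option Int) (maxIdx : Int)
    (line : List String) (sym : Option Int) : Option Int :=
  if PySem.List.count pattern line == 1 then sym
  else
    let indices := pvIndices pattern line
    if ¬ ((0 : Int) ∈ indices ∨ maxIdx ∈ indices) then sym
    else
      -- indices[0] / indices[-1]: indices is nonempty whenever this branch is reached
      let sym1 := if PySem.List.pyGet? indices 0 == some (0 : Int)
                  then pvTopLoop pattern old (PySem.List.slice indices (some 1) none) sym else sym
      if PySem.List.pyGet? indices (-1) == some maxIdx
      then pvBotLoop pattern old maxIdx (PySem.List.slice indices none (some (-1))) sym1 else sym1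

def pvOuter (pattern : List (List String)) (old : Option Int) (maxIdx : Int) :
    List (List String) → Option Int → Option Int
  | [], sym => sym
  | line :: rest, sym =>
    if pvTruthy sym then sym
    else pvOuter pattern old maxIdx rest (pvBody pattern old maxIdx line sym)

def find_row_symmetry (pattern : List (List String)) (old_symmetry : Option Int) : Option Int :=
  pvOuter pattern old_symmetry (PySem.List.len pattern - 1) pattern none

-- ===== PORT B =====

-- `all(pattern[p-1-k] == pattern[p+k] for k in range(min(p, n-p)))`
def pvAltCheck (pattern : List (List String)) (n p : Int) : Bool :=
  (PySem.List.pyRange 0 (min p (n - p)) 1).all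
    (fun k => PySem.List.pyGet? pattern (p - 1 - k) == PySem.List.pyGet? pattern (p + k))

-- `for p in range(1, n): …`
def pvAltLoop (pattern : List (List String)) (old : Option Int) (n : Int) : List Int → Option Int
  | [] => none
  | p :: rest =>
    if some p == old then pvAltLoop pattern old n rest
    else if pvAltCheck pattern n p then some p
    else pvAltLoop pattern old n rest

def find_row_symmetry_alt (pattern : List (List String)) (old_symmetry : Option Int) : Option Int :=
  let n := PySem.List.len pattern
  pvAltLoop pattern old_symmetry n (PySem.List.pyRange 1 n 1)

-- ===== PRECONDITION & SPEC =====

-- On patterns whose first and last rows are equal and that admit both a top-anchored reflection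
-- strictly above the middle and a bottom-anchored reflection (each different from old_symmetry),
-- A's bottom-edge scan accidentally overwrites the already-found smaller top reflection and returns
-- the bottom one, while B returns the smallest valid reflection line, the intended first match.
-- pvRef g o: g has a mirror line p touching its top edge (the p rows above the line, reversed,
-- equal the p rows below it) with p not the excluded line o
abbrev pvRef (g : List (List String)) (o : Option Int) : Prop :=
  ∃ p < g.length, 0 < p ∧ (g.take p).reverse = (g.drop p).take p ∧ (p : Int) ∉ o

def D_find_row_symmetry (pattern : List (List String)) (old_symmetry : Option Int) : Prop :=
  pattern.head? = pattern.getLast? ∧ pvRef pattern.dropLast old_symmetry ∧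
  pvRef pattern.reverse (old_symmetry.map ((pattern.length : Int) - ·))

instance (pattern : List (List String)) (old_symmetry : Option Int) :
    Decidable (D_find_row_symmetry pattern old_symmetry) := by
  unfold D_find_row_symmetry; infer_instance

def Spec_find_row_symmetry (pattern : List (List String)) (old_symmetry : Option Int) (out : Option Int) : Prop :=
  ¬ D_find_row_symmetry pattern old_symmetry → out = find_row_symmetry_alt pattern old_symmetry
instance (pattern : List (List String)) (old_symmetry : Option Int) (out : Option Int) :
    Decidable (Spec_find_row_symmetry pattern old_symmetry out) := by
  unfold Spec_find_row_symmetry; infer_instance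

def pvDiffWitness_find_row_symmetry : List (List String) × Option Int :=
  ([["a"], ["a"], ["a"], ["b"], ["b"], ["a"]], none)
def pvDiffWitnessOut_find_row_symmetry : (Option Int) × (Option Int) := (some 4, some 1)

-- ===== CLAIM =====

def Claim_unchanged_find_row_symmetry : Prop := ∀ (pattern : List (List String)) (old_symmetry : Option Int), Dom_find_row_symmetry pattern old_symmetry → Spec_find_row_symmetry pattern old_symmetry (find_row_symmetry pattern old_symmetry)
def Claim_changed_find_row_symmetry : Prop := Dom_find_row_symmetry (pvDiffWitness_find_row_symmetry.1) (pvDiffWitness_find_row_symmetry.2) ∧ D_find_row_symmetry (pvDiffWitness_find_row_symmetry.1) (pvDiffWitness_find_row_symmetry.2) ∧ find_row_symmetry (pvDiffWitness_find_row_symmetry.1) (pvDiffWitness_find_row_symmetry.2) = pvDiffWitnessOut_find_row_symmetry.1 ∧ find_row_symmetry_alt (pvDiffWitness_find_row_symmetry.1) (pvDiffWitness_find_row_symmetry.2) = pvDiffWitnessOut_find_row_symmetry.2 ∧ pvDiffWitnessOut_find_row_symmetry.1 ≠ pvDiffWitnessOut_find_row_symmetry.2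
def Claim_exact_find_row_symmetry : Prop := ∀ (pattern : List (List String)) (old_symmetry : Option Int), Dom_find_row_symmetry pattern old_symmetry → D_find_row_symmetry pattern old_symmetry → find_row_symmetry pattern old_symmetry ≠ find_row_symmetry_alt pattern old_symmetry

-- ===== LEMMAS AND PROOFS =====

-- The first valid reflection position touching the TOP edge (2p ≤ n), resp. the BOTTOM edge (n ≤ 2p).
def pvGoodB (pat : List (List String)) (o : Option Int) (p : Int) : Bool :=
  (!(some p == o)) && pvAltCheck pat (pat.length : Int) p
def pvTF (pat : List (List String)) (o : Option Int) : Option Int :=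
  (PySem.List.pyRange 1 pat.length 1).find? (fun p => decide (2 * p ≤ (pat.length : Int)) && pvGoodB pat o p)
abbrev PalT (pat : List (List String)) (p : Nat) : Prop :=
  (pat.take (2 * p)).reverse = pat.take (2 * p)
abbrev PalD (pat : List (List String)) (q : Nat) : Prop :=
  (pat.drop (2 * q - pat.length)).reverse = pat.drop (2 * q - pat.length)

def pvBF (pat : List (List String)) (o : Option Int) : Option Int :=
  (PySem.List.pyRange 1 pat.length 1).find? (fun p => decide ((pat.length : Int) ≤ 2 * p) && pvGoodB pat o p)

-- generic find? facts on sorted Int lists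
theorem pvFind?_sorted_eq_some {l : List Int} (hs : l.Pairwise (· < ·)) (f : Int → Bool) (x : Int) :
    l.find? f = some x ↔ x ∈ l ∧ f x = true ∧ ∀ y ∈ l, y < x → f y = false := by
  induction l with
  | nil => simp
  | cons a t ih =>
    have hs' : t.Pairwise (· < ·) := hs.of_cons
    cases ha : f a with
    | true =>
      simp only [List.find?_cons, ha]
      constructor
      · rintro h
        have hax : a = x := by simpa using h
        subst hax
        refine ⟨List.mem_cons_self, ha, ?_⟩
        intro y hy hlt
        rcases List.mem_cons.mp hy with rfl | hyt
        · omega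
        · exact absurd (List.rel_of_pairwise_cons hs hyt) (by omega)
      · rintro ⟨hx, hfx, hmin⟩
        rcases List.mem_cons.mp hx with rfl | hxt
        · rfl
        · have hax : a < x := List.rel_of_pairwise_cons hs hxt
          have := hmin a List.mem_cons_self hax
          rw [ha] at this; cases this
    | false =>
      simp only [List.find?_cons, ha]
      rw [ih hs']
      constructor
      · rintro ⟨hx, hfx, hmin⟩
        refine ⟨List.mem_cons_of_mem _ hx, hfx, ?_⟩
        intro y hy hlt
        rcases List.mem_cons.mp hy with rfl | hyt
        · exact ha
        · exact hmin y hyt hlt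
      · rintro ⟨hx, hfx, hmin⟩
        rcases List.mem_cons.mp hx with rfl | hxt
        · rw [ha] at hfx; cases hfx
        · exact ⟨hxt, hfx, fun y hy hlt => hmin y (List.mem_cons_of_mem _ hy) hlt⟩

theorem pvFind?_congr {l : List Int} {f g : Int → Bool} (h : ∀ x ∈ l, f x = g x) :
    l.find? f = l.find? g := by
  induction l with
  | nil => rfl
  | cons a t ih =>
    rw [List.find?_cons, List.find?_cons, h a List.mem_cons_self,
      ih (fun x hx => h x (List.mem_cons_of_mem _ hx))]

theorem pvPairLoopF_even (f : Nat) (l : List (List String)) (hf : l.length ≤ f)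
    (he : l.length % 2 = 0) : pvPairLoopF f l = true ↔ l.reverse = l := by
  induction f generalizing l with
  | zero =>
    have : l = [] := List.eq_nil_of_length_eq_zero (by omega)
    subst this; simp [pvPairLoopF]
  | succ f ih =>
    match l with
    | [] => simp [pvPairLoopF]
    | [x] => simp at he
    | x :: y :: ys =>
      have ht : (y :: ys) ≠ [] := by simp
      have hdec : (y :: ys).dropLast ++ [(y :: ys).getLast ht] = y :: ys :=
        List.dropLast_concat_getLast ht
      have hlenm : (y :: ys).dropLast.length = ys.length := by simp
      have hlen : (x :: y :: ys).length = ys.length + 2 := by simp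
      have hrec := ih ((y :: ys).dropLast) (by simp at hf ⊢; omega) (by rw [hlenm]; omega)
      show (if x ≠ (y :: ys).getLast ht then false else pvPairLoopF f ((y :: ys).dropLast)) = true
        ↔ (x :: y :: ys).reverse = x :: y :: ys
      conv_rhs => rw [← hdec]
      rw [List.reverse_cons, List.reverse_append]
      simp only [List.reverse_cons, List.reverse_nil, List.nil_append, List.cons_append,
        List.cons.injEq]
      by_cases hx : x = (y :: ys).getLast ht
      · rw [← hx, if_neg (show ¬ x ≠ x by simp), List.append_left_inj, hrec]
        simp
      · rw [if_pos hx]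
        constructor
        · intro h; cases h
        · rintro ⟨h1, -⟩; exact absurd h1.symm hx

-- pointwise pairs ↔ palindrome of the mirrored block
theorem pvPairs_iff_palin (pat : List (List String)) (p m : Nat) (hmp : m ≤ p)
    (hn : p + m ≤ pat.length) :
    (∀ k, k < m → pat[p - 1 - k]? = pat[p + k]?) ↔
      ((pat.drop (p - m)).take (2 * m)).reverse = (pat.drop (p - m)).take (2 * m) := by
  have hb : ((pat.drop (p - m)).take (2 * m)).length = 2 * m := by
    rw [List.length_take, List.length_drop]; omega
  have hget : ∀ j, j < 2 * m → ((pat.drop (p - m)).take (2 * m))[j]? = pat[p - m + j]? := by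
    intro j hj
    rw [List.getElem?_take_of_lt hj, List.getElem?_drop]
  constructor
  · intro hpair
    apply List.ext_getElem?
    intro j
    by_cases hj : j < 2 * m
    · rw [List.getElem?_reverse (by omega), hb, hget j hj, hget (2 * m - 1 - j) (by omega)]
      by_cases hjm : j < m
      · have := hpair (m - 1 - j) (by omega)
        have e1 : p - 1 - (m - 1 - j) = p - m + j := by omega
        have e2 : p + (m - 1 - j) = p - m + (2 * m - 1 - j) := by omega
        rw [e1, e2] at this
        exact this.symm
      · have := hpair (j - m) (by omega)
        have e1 : p - 1 - (j - m) = p - m + (2 * m - 1 - j) := by omega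
        have e2 : p + (j - m) = p - m + j := by omega
        rw [e1, e2] at this
        exact this
    · rw [List.getElem?_eq_none (by rw [List.length_reverse, hb]; omega),
        List.getElem?_eq_none (by rw [hb]; omega)]
  · intro hpal k hk
    have := congrArg (fun l => l[m + k]?) hpal
    simp only at this
    rw [List.getElem?_reverse (by omega), hb, hget (m + k) (by omega),
      hget (2 * m - 1 - (m + k)) (by omega)] at this
    have e1 : p - m + (2 * m - 1 - (m + k)) = p - 1 - k := by omega
    have e2 : p - m + (m + k) = p + k := by omega
    rw [e1, e2] at this
    exact this

-- the generator test of B, as the pointwise pair condition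
theorem pvAltCheck_pairs (pat : List (List String)) (p m : Nat)
    (hm : ((m : Int)) = min (p : Int) ((pat.length : Int) - (p : Int))) :
    pvAltCheck pat (pat.length : Int) (p : Int) = true ↔
      ∀ k, k < m → pat[p - 1 - k]? = pat[p + k]? := by
  unfold pvAltCheck
  rw [← hm, PySem.List.pyRange_zero_nat]
  rw [List.all_eq_true]
  constructor
  · intro h k hk
    have hmem : ((k : Int)) ∈ (List.range m).map (fun k : Nat => (k : Int)) := by
      simp [List.mem_range]; omega
    have := h _ hmem
    have hkp : k < p := by omega
    have e1 : (p : Int) - 1 - (k : Int) = ((p - 1 - k : Nat) : Int) := by omega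
    have e2 : (p : Int) + (k : Int) = ((p + k : Nat) : Int) := by omega
    rw [e1, e2, PySem.List.pyGet?_natCast, PySem.List.pyGet?_natCast] at this
    exact beq_iff_eq.mp this
  · intro h x hx
    simp only [List.mem_map, List.mem_range] at hx
    obtain ⟨k, hk, rfl⟩ := hx
    have hkp : k < p := by omega
    have e1 : (p : Int) - 1 - (k : Int) = ((p - 1 - k : Nat) : Int) := by omega
    have e2 : (p : Int) + (k : Int) = ((p + k : Nat) : Int) := by omega
    rw [e1, e2, PySem.List.pyGet?_natCast, PySem.List.pyGet?_natCast]
    exact beq_iff_eq.mpr (h k hk)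

theorem pvAltCheck_top (pat : List (List String)) (p : Nat) (_hp : 1 ≤ p) (h2 : 2 * p ≤ pat.length) :
    pvAltCheck pat (pat.length : Int) (p : Int) = true ↔ PalT pat p := by
  rw [pvAltCheck_pairs pat p p (by rw [min_eq_left (by omega)]),
    pvPairs_iff_palin pat p p (le_refl p) (by omega)]
  simp [PalT]

theorem pvAltCheck_bot (pat : List (List String)) (q : Nat) (hq : pat.length ≤ 2 * q) (hqn : q < pat.length) :
    pvAltCheck pat (pat.length : Int) (q : Int) = true ↔ PalD pat q := by
  rw [pvAltCheck_pairs pat q (pat.length - q) (by rw [min_eq_right (by omega)]; omega),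
    pvPairs_iff_palin pat q (pat.length - q) (by omega) (by omega)]
  have e1 : q - (pat.length - q) = 2 * q - pat.length := by omega
  have e2 : (pat.drop (2 * q - pat.length)).take (2 * (pat.length - q)) = pat.drop (2 * q - pat.length) := by
    apply List.take_of_length_le
    rw [List.length_drop]; omega
  rw [e1, e2]

-- common reduction of check_symmetry_between_rows on a nat slice [s, s+L)
theorem pvCheck_core (pat : List (List String)) (s L : Nat) (hL : s + L ≤ pat.length) :
    check_symmetry_between_rows (s : Int) ((s : Int) + (L : Int) - 1) pat =
      if L % 2 ≠ 0 then none
      else if pvPairLoopF ((pat.drop s).take L).length ((pat.drop s).take L) then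
        some ((s : Int) + PySem.Int.floordiv ((L : Int) - 1) 2 + 1)
      else none := by
  unfold check_symmetry_between_rows
  have e0 : (s : Int) + (L : Int) - 1 + 1 = (s : Int) + (L : Int) := by ring
  rw [e0, PySem.List.slice_natCast_add]
  have hlen : ((pat.drop s).take L).length = L := by
    rw [List.length_take, List.length_drop]; omega
  simp only [PySem.List.len_eq, hlen]
  have hmod : PySem.Int.mod ((L : Nat) : Int) 2 = ((L % 2 : Nat) : Int) := by
    exact_mod_cast PySem.Int.mod_natCast L 2
  rw [hmod]
  have e1 : (s : Int) + (L : Int) - 1 - (s : Int) = (L : Int) - 1 := by ring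
  rw [e1]
  by_cases hpar : L % 2 = 0
  · rw [if_neg (show ¬ ((L % 2 : Nat) : Int) ≠ 0 by rw [hpar]; simp),
      if_neg (show ¬ L % 2 ≠ 0 by omega)]
  · rw [if_pos (show ((L % 2 : Nat) : Int) ≠ 0 by
      have : L % 2 = 1 := by omega
      rw [this]; simp), if_pos hpar]

theorem pvCheck_top_pos (pat : List (List String)) (p : Nat) (_hp : 1 ≤ p) (h2 : 2 * p ≤ pat.length)
    (hP : PalT pat p) :
    check_symmetry_between_rows 0 (2 * (p : Int) - 1) pat = some (p : Int) := by
  have e : (2 * (p : Int) - 1) = ((0 : Nat) : Int) + ((2 * p : Nat) : Int) - 1 := by push_cast; ring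
  rw [show (0 : Int) = ((0 : Nat) : Int) from rfl, e, pvCheck_core pat 0 (2 * p) (by omega)]
  rw [if_neg (by omega)]
  rw [if_pos]
  · have hfd : PySem.Int.floordiv (((2 * p : Nat) : Int) - 1) 2 = (p : Int) - 1 := by
      rw [PySem.Int.floordiv_eq_iff_of_pos (by norm_num)]
      constructor <;> push_cast <;> omega
    rw [hfd]; congr 1; push_cast; ring
  · rw [pvPairLoopF_even _ _ (le_refl _) (by rw [List.length_take, List.length_drop]; omega)]
    simpa [PalT] using hP

theorem pvCheck_top_neg (pat : List (List String)) (p : Nat) (_hp : 1 ≤ p) (h2 : 2 * p ≤ pat.length)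
    (hP : ¬ PalT pat p) :
    check_symmetry_between_rows 0 (2 * (p : Int) - 1) pat = none := by
  have e : (2 * (p : Int) - 1) = ((0 : Nat) : Int) + ((2 * p : Nat) : Int) - 1 := by push_cast; ring
  rw [show (0 : Int) = ((0 : Nat) : Int) from rfl, e, pvCheck_core pat 0 (2 * p) (by omega)]
  rw [if_neg (by omega)]
  rw [if_neg]
  rw [pvPairLoopF_even _ _ (le_refl _) (by rw [List.length_take, List.length_drop]; omega)]
  simpa [PalT] using hP

theorem pvCheck_top_none (pat : List (List String)) (i : Nat) (hi : i < pat.length) (he : i % 2 = 0) :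
    check_symmetry_between_rows 0 (i : Int) pat = none := by
  have e : (i : Int) = ((0 : Nat) : Int) + ((i + 1 : Nat) : Int) - 1 := by push_cast; ring
  rw [show (0 : Int) = ((0 : Nat) : Int) from rfl, e, pvCheck_core pat 0 (i + 1) (by omega)]
  rw [if_pos (by omega)]

theorem pvCheck_bot_pos (pat : List (List String)) (q : Nat) (hq : pat.length ≤ 2 * q) (hqn : q < pat.length)
    (hP : PalD pat q) :
    check_symmetry_between_rows (2 * (q : Int) - pat.length) ((pat.length : Int) - 1) pat = some (q : Int) := by
  have e0 : (2 * (q : Int) - pat.length) = ((2 * q - pat.length : Nat) : Int) := by push_cast; omega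
  have e : ((pat.length : Int) - 1)
      = ((2 * q - pat.length : Nat) : Int) + ((2 * (pat.length - q) : Nat) : Int) - 1 := by
    push_cast; omega
  rw [e0, e, pvCheck_core pat (2 * q - pat.length) (2 * (pat.length - q)) (by omega)]
  rw [if_neg (by omega)]
  have hdt : (pat.drop (2 * q - pat.length)).take (2 * (pat.length - q)) = pat.drop (2 * q - pat.length) := by
    apply List.take_of_length_le
    rw [List.length_drop]; omega
  rw [hdt, if_pos]
  · have hfd : PySem.Int.floordiv (((2 * (pat.length - q) : Nat) : Int) - 1) 2
        = (pat.length : Int) - (q : Int) - 1 := by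
      rw [PySem.Int.floordiv_eq_iff_of_pos (by norm_num)]
      constructor <;> push_cast <;> omega
    rw [hfd]; congr 1; push_cast; omega
  · rw [pvPairLoopF_even _ _ (le_refl _) (by rw [List.length_drop]; omega)]
    exact hP

theorem pvCheck_bot_neg (pat : List (List String)) (q : Nat) (hq : pat.length ≤ 2 * q) (hqn : q < pat.length)
    (hP : ¬ PalD pat q) :
    check_symmetry_between_rows (2 * (q : Int) - pat.length) ((pat.length : Int) - 1) pat = none := by
  have e0 : (2 * (q : Int) - pat.length) = ((2 * q - pat.length : Nat) : Int) := by push_cast; omega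
  have e : ((pat.length : Int) - 1)
      = ((2 * q - pat.length : Nat) : Int) + ((2 * (pat.length - q) : Nat) : Int) - 1 := by
    push_cast; omega
  rw [e0, e, pvCheck_core pat (2 * q - pat.length) (2 * (pat.length - q)) (by omega)]
  rw [if_neg (by omega)]
  have hdt : (pat.drop (2 * q - pat.length)).take (2 * (pat.length - q)) = pat.drop (2 * q - pat.length) := by
    apply List.take_of_length_le
    rw [List.length_drop]; omega
  rw [hdt, if_neg]
  rw [pvPairLoopF_even _ _ (le_refl _) (by rw [List.length_drop]; omega)]
  exact hP

theorem pvCheck_bot_none (pat : List (List String)) (s : Nat) (hs : s < pat.length)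
    (ho : (pat.length - s) % 2 = 1) :
    check_symmetry_between_rows (s : Int) ((pat.length : Int) - 1) pat = none := by
  have e : ((pat.length : Int) - 1) = (s : Int) + ((pat.length - s : Nat) : Int) - 1 := by
    push_cast; omega
  rw [e, pvCheck_core pat s (pat.length - s) (by omega)]
  rw [if_pos (by omega)]

theorem pvMem_indices (pat : List (List String)) (line : List String) (i : Int) :
    i ∈ pvIndices pat line ↔ ∃ (k : Nat) (hk : k < pat.length), i = (k : Int) ∧ pat[k] = line := by
  unfold pvIndices
  rw [List.mem_filterMap]
  constructor
  · rintro ⟨iv, hmem, hf⟩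
    rw [PySem.List.mem_enumerate_iff] at hmem
    obtain ⟨k, hk, rfl⟩ := hmem
    by_cases h : (pat[k] == line) = true
    · rw [if_pos h] at hf
      refine ⟨k, hk, ?_, beq_iff_eq.mp h⟩
      have := Option.some.inj hf
      omega
    · rw [if_neg h] at hf; cases hf
  · rintro ⟨k, hk, rfl, hline⟩
    refine ⟨((0 : Int) + (k : Int), pat[k]), ?_, ?_⟩
    · rw [PySem.List.mem_enumerate_iff]; exact ⟨k, hk, rfl⟩
    · simp [hline]

theorem pvPairwise_indices (pat : List (List String)) (line : List String) :
    (pvIndices pat line).Pairwise (· < ·) := by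
  unfold pvIndices
  rw [List.pairwise_filterMap]
  refine (PySem.List.pairwise_lt_enumerate pat 0).imp ?_
  intro a b hab x hx y hy
  split_ifs at hx hy
  rw [← Option.some.inj hx, ← Option.some.inj hy]; exact hab

theorem pvSorted_head? {l : List Int} (hs : l.Pairwise (· < ·)) {x : Int} (hx : x ∈ l)
    (hmin : ∀ y ∈ l, x ≤ y) : l.head? = some x := by
  match l with
  | [] => cases hx
  | a :: t =>
    rcases List.mem_cons.mp hx with rfl | hxt
    · rfl
    · have h1 : a < x := List.rel_of_pairwise_cons hs hxt
      have h2 : x ≤ a := hmin a List.mem_cons_self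
      omega

theorem pvSorted_getLast? {l : List Int} (hs : l.Pairwise (· < ·)) {x : Int} (hx : x ∈ l)
    (hmax : ∀ y ∈ l, y ≤ x) : l.getLast? = some x := by
  match l with
  | [] => cases hx
  | [a] =>
    rcases List.mem_cons.mp hx with rfl | h
    · rfl
    · cases h
  | a :: b :: t =>
    rw [List.getLast?_cons_cons]
    rcases List.mem_cons.mp hx with rfl | hxt
    · have h1 : x < b := List.rel_of_pairwise_cons hs List.mem_cons_self
      have h2 : b ≤ x := hmax b (List.mem_cons_of_mem _ List.mem_cons_self)
      omega
    · exact pvSorted_getLast? hs.of_cons hxt (fun y hy => hmax y (List.mem_cons_of_mem _ hy))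

theorem pvSorted_tail_mem {l : List Int} (hs : l.Pairwise (· < ·)) {a : Int} (hh : l.head? = some a)
    (y : Int) : y ∈ l.tail ↔ y ∈ l ∧ y ≠ a := by
  match l with
  | [] => cases hh
  | b :: t =>
    have hba : b = a := by simpa using hh
    subst hba
    simp only [List.tail_cons]
    constructor
    · intro hyt
      have : b < y := List.rel_of_pairwise_cons hs hyt
      exact ⟨List.mem_cons_of_mem _ hyt, by omega⟩
    · rintro ⟨hy, hne⟩
      rcases List.mem_cons.mp hy with rfl | h
      · exact absurd rfl hne
      · exact h

theorem pvSorted_dropLast_mem {l : List Int} (hs : l.Pairwise (· < ·)) {a : Int} (hh : l.getLast? = some a)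
    (y : Int) : y ∈ l.dropLast ↔ y ∈ l ∧ y ≠ a := by
  have hne : l ≠ [] := by rintro rfl; cases hh
  have hlast : l.getLast hne = a := by
    rw [List.getLast?_eq_getLast hne] at hh
    exact Option.some.inj hh
  have hdec : l.dropLast ++ [a] = l := by rw [← hlast]; exact List.dropLast_concat_getLast hne
  have hlt : ∀ z ∈ l.dropLast, z < a := by
    have hp := hdec ▸ hs
    rw [List.pairwise_append] at hp
    intro z hz
    exact hp.2.2 z hz a List.mem_cons_self
  constructor
  · intro hy
    refine ⟨?_, by have := hlt y hy; omega⟩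
    rw [← hdec]; exact List.mem_append_left _ hy
  · rintro ⟨hy, hne2⟩
    rw [← hdec] at hy
    rcases List.mem_append.mp hy with h | h
    · exact h
    · rcases List.mem_cons.mp h with rfl | hz
      · exact absurd rfl hne2
      · cases hz

-- hit predicates: the loop-body tests of A's two inner loops
def pvHitT (pat : List (List String)) (o : Option Int) (i : Int) : Bool :=
  pvTruthy (check_symmetry_between_rows 0 i pat) && !(check_symmetry_between_rows 0 i pat == o)
def pvHitB (pat : List (List String)) (o : Option Int) (mI : Int) (i : Int) : Bool :=
  pvTruthy (check_symmetry_between_rows i mI pat) && !(check_symmetry_between_rows i mI pat == o)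

theorem pvTopLoop_eq (pat : List (List String)) (o : Option Int) (l : List Int) (sym : Option Int) :
    pvTopLoop pat o l sym
      = match l.find? (pvHitT pat o) with
        | some i => check_symmetry_between_rows 0 i pat
        | none => sym := by
  induction l with
  | nil => rfl
  | cons i rest ih =>
    rw [List.find?_cons]
    show (if pvTruthy (check_symmetry_between_rows 0 i pat) then
            if check_symmetry_between_rows 0 i pat == o then pvTopLoop pat o rest sym
            else check_symmetry_between_rows 0 i pat
          else pvTopLoop pat o rest sym) = _
    by_cases h1 : pvTruthy (check_symmetry_between_rows 0 i pat) = true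
    · by_cases h2 : (check_symmetry_between_rows 0 i pat == o) = true
      · have hh : pvHitT pat o i = false := by unfold pvHitT; rw [h1, h2]; rfl
        rw [hh, if_pos h1, if_pos h2, ih]
      · have hh : pvHitT pat o i = true := by
          unfold pvHitT; rw [h1, Bool.eq_false_iff.mpr h2]; rfl
        rw [hh, if_pos h1, if_neg h2]
    · have hh : pvHitT pat o i = false := by
        unfold pvHitT; rw [Bool.eq_false_iff.mpr h1]; rfl
      rw [hh, if_neg h1, ih]

theorem pvBotLoop_eq (pat : List (List String)) (o : Option Int) (mI : Int) (l : List Int) (sym : Option Int) :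
    pvBotLoop pat o mI l sym
      = match l.find? (pvHitB pat o mI) with
        | some i => check_symmetry_between_rows i mI pat
        | none => sym := by
  induction l with
  | nil => rfl
  | cons i rest ih =>
    rw [List.find?_cons]
    show (if pvTruthy (check_symmetry_between_rows i mI pat) then
            if check_symmetry_between_rows i mI pat == o then pvBotLoop pat o mI rest sym
            else check_symmetry_between_rows i mI pat
          else pvBotLoop pat o mI rest sym) = _
    by_cases h1 : pvTruthy (check_symmetry_between_rows i mI pat) = true
    · by_cases h2 : (check_symmetry_between_rows i mI pat == o) = true
      · have hh : pvHitB pat o mI i = false := by unfold pvHitB; rw [h1, h2]; rfl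
        rw [hh, if_pos h1, if_pos h2, ih]
      · have hh : pvHitB pat o mI i = true := by
          unfold pvHitB; rw [h1, Bool.eq_false_iff.mpr h2]; rfl
        rw [hh, if_pos h1, if_neg h2]
    · have hh : pvHitB pat o mI i = false := by
        unfold pvHitB; rw [Bool.eq_false_iff.mpr h1]; rfl
      rw [hh, if_neg h1, ih]

-- the duplicate-count fact: two distinct positions holding `line` give count ≥ 2
theorem pvTwo_le_count (pat : List (List String)) (line : List String) (k1 k2 : Nat)
    (h12 : k1 < k2) (h2 : k2 < pat.length) (e1 : pat[k1]'(by omega) = line) (e2 : pat[k2] = line) :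
    2 ≤ PySem.List.count pat line := by
  rw [PySem.List.count_eq]
  have hm1 : line ∈ pat.take k2 := by
    have hl : k1 < (pat.take k2).length := by rw [List.length_take]; omega
    have : (pat.take k2)[k1] = line := by rw [List.getElem_take]; exact e1
    exact this ▸ List.getElem_mem hl
  have hm2 : line ∈ pat.drop k2 := by
    have hl : 0 < (pat.drop k2).length := by rw [List.length_drop]; omega
    have : (pat.drop k2)[0] = line := by rw [List.getElem_drop]; simpa using e2
    exact this ▸ List.getElem_mem hl
  have c1 : 0 < (pat.take k2).count line := List.count_pos_iff.mpr hm1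
  have c2 : 0 < (pat.drop k2).count line := List.count_pos_iff.mpr hm2
  calc 2 ≤ (pat.take k2).count line + (pat.drop k2).count line := by omega
    _ = pat.count line := by rw [← List.count_append, List.take_append_drop]

theorem pvPalT_edge (pat : List (List String)) (p : Nat) (hp : 1 ≤ p) (h2 : 2 * p ≤ pat.length)
    (hP : PalT pat p) : pat[2 * p - 1]'(by omega) = pat[0]'(by omega) := by
  have hlt : (pat.take (2 * p)).length = 2 * p := by rw [List.length_take]; omega
  have h0 : ((pat.take (2 * p)).reverse)[0]? = (pat.take (2 * p))[0]? := by rw [hP]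
  rw [List.getElem?_reverse (by rw [hlt]; omega), hlt, Nat.sub_zero] at h0
  rw [List.getElem?_take_of_lt (by omega), List.getElem?_take_of_lt (by omega)] at h0
  rw [List.getElem?_eq_getElem (by omega), List.getElem?_eq_getElem (by omega)] at h0
  exact Option.some.inj h0

theorem pvPalD_edge (pat : List (List String)) (q : Nat) (hq : pat.length ≤ 2 * q) (hqn : q < pat.length)
    (hP : PalD pat q) : pat[2 * q - pat.length]'(by omega) = pat[pat.length - 1]'(by omega) := by
  have hlt : (pat.drop (2 * q - pat.length)).length = 2 * (pat.length - q) := by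
    rw [List.length_drop]; omega
  have h0 : ((pat.drop (2 * q - pat.length)).reverse)[0]? = (pat.drop (2 * q - pat.length))[0]? := by
    rw [hP]
  rw [List.getElem?_reverse (by rw [hlt]; omega), hlt, Nat.sub_zero] at h0
  rw [List.getElem?_drop, List.getElem?_drop] at h0
  rw [List.getElem?_eq_getElem (by omega), List.getElem?_eq_getElem (by omega)] at h0
  have := Option.some.inj h0
  have egoal : 2 * q - pat.length + (2 * (pat.length - q) - 1) = pat.length - 1 := by omega
  have egoal2 : 2 * q - pat.length + 0 = 2 * q - pat.length := by omega
  symm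
  simp only [egoal, egoal2] at this
  exact this

-- the top inner loop's test at row index k, as B's predicate at position (k+1)/2
theorem pvHitT_pred (pat : List (List String)) (o : Option Int) (k : Nat) (hk : k < pat.length) :
    pvHitT pat o (k : Int) = true ↔
      (k % 2 = 1 ∧ pvGoodB pat o (((k + 1) / 2 : Nat) : Int) = true) := by
  by_cases hpar : k % 2 = 0
  · constructor
    · intro h
      unfold pvHitT at h
      rw [pvCheck_top_none pat k hk hpar] at h
      simp [pvTruthy] at h
    · rintro ⟨h1, -⟩; omega
  · have hp1 : 1 ≤ (k + 1) / 2 := by omega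
    have h2p : 2 * ((k + 1) / 2) ≤ pat.length := by omega
    have hcast : (k : Int) = 2 * ((((k + 1) / 2 : Nat)) : Int) - 1 := by push_cast; omega
    unfold pvHitT
    rw [hcast]
    by_cases hPal : PalT pat ((k + 1) / 2)
    · rw [pvCheck_top_pos pat _ hp1 h2p hPal]
      unfold pvGoodB
      rw [show pvAltCheck pat (pat.length : Int) ((((k + 1) / 2 : Nat)) : Int) = true from
        (pvAltCheck_top pat _ hp1 h2p).mpr hPal, Bool.and_true]
      have ht : pvTruthy (some ((((k + 1) / 2 : Nat)) : Int)) = true := by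
        simp [pvTruthy]; omega
      rw [ht, Bool.true_and]
      constructor
      · intro h; exact ⟨by omega, h⟩
      · rintro ⟨-, h⟩; exact h
    · rw [pvCheck_top_neg pat _ hp1 h2p hPal]
      constructor
      · intro h; simp [pvTruthy] at h
      · rintro ⟨-, hgb⟩
        unfold pvGoodB at hgb
        rw [Bool.eq_false_iff.mpr (fun hc => hPal ((pvAltCheck_top pat _ hp1 h2p).mp hc)),
          Bool.and_false] at hgb
        cases hgb

-- the bottom inner loop's test at row index s, as B's predicate at position (s+n)/2
theorem pvHitB_pred (pat : List (List String)) (o : Option Int) (s : Nat) (hs : s < pat.length) :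
    pvHitB pat o ((pat.length : Int) - 1) (s : Int) = true ↔
      ((pat.length - s) % 2 = 0 ∧ pvGoodB pat o (((s + pat.length) / 2 : Nat) : Int) = true) := by
  by_cases hpar : (pat.length - s) % 2 = 0
  · have hq2 : pat.length ≤ 2 * ((s + pat.length) / 2) := by omega
    have hqn : (s + pat.length) / 2 < pat.length := by omega
    have hcast : (s : Int) = 2 * ((((s + pat.length) / 2 : Nat)) : Int) - pat.length := by
      push_cast; omega
    unfold pvHitB
    rw [hcast]
    by_cases hPal : PalD pat ((s + pat.length) / 2)
    · rw [pvCheck_bot_pos pat _ hq2 hqn hPal]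
      unfold pvGoodB
      rw [show pvAltCheck pat (pat.length : Int) ((((s + pat.length) / 2 : Nat)) : Int) = true from
        (pvAltCheck_bot pat _ hq2 hqn).mpr hPal, Bool.and_true]
      have ht : pvTruthy (some ((((s + pat.length) / 2 : Nat)) : Int)) = true := by
        simp [pvTruthy]; omega
      rw [ht, Bool.true_and]
      constructor
      · intro h; exact ⟨hpar, h⟩
      · rintro ⟨-, h⟩; exact h
    · rw [pvCheck_bot_neg pat _ hq2 hqn hPal]
      constructor
      · intro h; simp [pvTruthy] at h
      · rintro ⟨-, hgb⟩
        unfold pvGoodB at hgb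
        rw [Bool.eq_false_iff.mpr (fun hc => hPal ((pvAltCheck_bot pat _ hq2 hqn).mp hc)),
          Bool.and_false] at hgb
        cases hgb
  · constructor
    · intro h
      unfold pvHitB at h
      rw [pvCheck_bot_none pat s hs (by omega)] at h
      simp [pvTruthy] at h
    · rintro ⟨h1, -⟩; omega

theorem pvTF_some_top (pat : List (List String)) (o : Option Int) (p : Int) (h : pvTF pat o = some p) :
    ∃ pN : Nat, p = (pN : Int) ∧ 1 ≤ pN ∧ 2 * pN ≤ pat.length ∧ pN < pat.length ∧
      PalT pat pN ∧ some (pN : Int) ≠ o := by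
  have hmem := List.mem_of_find?_eq_some h
  rw [PySem.List.mem_pyRange_one] at hmem
  have hpred := List.find?_some h
  have h2p : (2 * p ≤ (pat.length : Int)) := by
    by_contra hc
    rw [decide_eq_false hc, Bool.false_and] at hpred
    cases hpred
  rw [decide_eq_true h2p, Bool.true_and] at hpred
  unfold pvGoodB at hpred
  simp only [Bool.and_eq_true] at hpred
  rcases hpred with ⟨hne, hac⟩
  refine ⟨p.toNat, by omega, by omega, by omega, by omega, ?_, ?_⟩
  · rw [← pvAltCheck_top pat p.toNat (by omega) (by omega)]
    have : ((p.toNat : Nat) : Int) = p := by omega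
    rw [this]
    exact hac
  · have : ((p.toNat : Nat) : Int) = p := by omega
    rw [this]
    intro hc
    rw [hc] at hne
    simp at hne

theorem pvBF_some_bot (pat : List (List String)) (o : Option Int) (q : Int) (h : pvBF pat o = some q) :
    ∃ qN : Nat, q = (qN : Int) ∧ pat.length ≤ 2 * qN ∧ qN < pat.length ∧
      PalD pat qN ∧ some (qN : Int) ≠ o := by
  have hmem := List.mem_of_find?_eq_some h
  rw [PySem.List.mem_pyRange_one] at hmem
  have hpred := List.find?_some h
  have h2q : ((pat.length : Int) ≤ 2 * q) := by
    by_contra hc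
    rw [decide_eq_false hc, Bool.false_and] at hpred
    cases hpred
  rw [decide_eq_true h2q, Bool.true_and] at hpred
  unfold pvGoodB at hpred
  simp only [Bool.and_eq_true] at hpred
  rcases hpred with ⟨hne, hac⟩
  refine ⟨q.toNat, by omega, by omega, by omega, ?_, ?_⟩
  · rw [← pvAltCheck_bot pat q.toNat (by omega) (by omega)]
    have : ((q.toNat : Nat) : Int) = q := by omega
    rw [this]
    exact hac
  · have : ((q.toNat : Nat) : Int) = q := by omega
    rw [this]
    intro hc
    rw [hc] at hne
    simp at hne


-- S1: A's top inner loop over indices[1:] (line = first row) computes pvTF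
theorem pvS1_eq (pat : List (List String)) (o : Option Int) (line : List String)
    (hl : pat[0]? = some line) :
    pvTopLoop pat o (PySem.List.slice (pvIndices pat line) (some 1) none) none = pvTF pat o := by
  obtain ⟨h0, hline⟩ := List.getElem?_eq_some_iff.mp hl
  have hsorted := pvPairwise_indices pat line
  have h0mem : (0 : Int) ∈ pvIndices pat line :=
    (pvMem_indices pat line 0).mpr ⟨0, h0, by simp, hline⟩
  have hnn : ∀ y ∈ pvIndices pat line, (0 : Int) ≤ y := by
    intro y hy
    rcases (pvMem_indices pat line y).mp hy with ⟨k, hk, rfl, -⟩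
    omega
  have hhead : (pvIndices pat line).head? = some 0 := pvSorted_head? hsorted h0mem hnn
  have htailmem := pvSorted_tail_mem hsorted hhead
  have htsorted : (pvIndices pat line).tail.Pairwise (· < ·) :=
    hsorted.sublist (List.tail_sublist _)
  rw [PySem.List.slice_from_one, pvTopLoop_eq]
  cases htf : pvTF pat o with
  | some p =>
    obtain ⟨pN, rfl, hp1, h2p, hpn, hPal, hne⟩ := pvTF_some_top pat o p htf
    have hmin : ∀ y ∈ PySem.List.pyRange 1 (pat.length : Int) 1, y < (pN : Int) →
        (decide (2 * y ≤ (pat.length : Int)) && pvGoodB pat o y) = false := by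
      have h2 := htf
      unfold pvTF at h2
      rw [pvFind?_sorted_eq_some (PySem.List.pairwise_lt_pyRange_one _ _)] at h2
      exact h2.2.2
    have hi0cast : ((2 * pN - 1 : Nat) : Int) = 2 * (pN : Int) - 1 := by push_cast; omega
    have hi0mem : ((2 * pN - 1 : Nat) : Int) ∈ (pvIndices pat line).tail := by
      rw [htailmem]
      refine ⟨(pvMem_indices pat line _).mpr ⟨2 * pN - 1, by omega, rfl,
        (pvPalT_edge pat pN hp1 h2p hPal).trans hline⟩, ?_⟩
      intro hc
      omega
    have hhit0 : pvHitT pat o ((2 * pN - 1 : Nat) : Int) = true := by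
      rw [pvHitT_pred pat o _ (by omega)]
      refine ⟨by omega, ?_⟩
      have e : (2 * pN - 1 + 1) / 2 = pN := by omega
      rw [e]
      unfold pvGoodB
      rw [show pvAltCheck pat (pat.length : Int) ((pN : Nat) : Int) = true from
        (pvAltCheck_top pat pN hp1 h2p).mpr hPal, Bool.and_true,
        beq_eq_false_iff_ne.mpr hne]
      rfl
    have hfind : (pvIndices pat line).tail.find? (pvHitT pat o) = some ((2 * pN - 1 : Nat) : Int) := by
      rw [pvFind?_sorted_eq_some htsorted]
      refine ⟨hi0mem, hhit0, ?_⟩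
      intro j hj hjlt
      rcases (htailmem j).mp hj with ⟨hjidx, hj0⟩
      rcases (pvMem_indices pat line j).mp hjidx with ⟨k, hk, rfl, hkline⟩
      by_contra hcb
      have hhitj : pvHitT pat o (k : Int) = true := by
        revert hcb; cases pvHitT pat o (k : Int) <;> simp
      rw [pvHitT_pred pat o k hk] at hhitj
      obtain ⟨hkodd, hgb⟩ := hhitj
      have hklt : k < 2 * pN - 1 := by omega
      have hm := hmin (((k + 1) / 2 : Nat) : Int)
        (by rw [PySem.List.mem_pyRange_one]; omega) (by omega)
      rw [decide_eq_true (by push_cast; omega : 2 * ((((k + 1) / 2 : Nat)) : Int) ≤ (pat.length : Int)),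
        Bool.true_and] at hm
      rw [hm] at hgb
      cases hgb
    rw [hfind]
    rw [show ((2 * pN - 1 : Nat) : Int) = 2 * (pN : Int) - 1 from hi0cast]
    exact pvCheck_top_pos pat pN hp1 h2p hPal
  | none =>
    have hnone : ∀ x ∈ PySem.List.pyRange 1 (pat.length : Int) 1,
        ¬ ((decide (2 * x ≤ (pat.length : Int)) && pvGoodB pat o x) = true) := by
      have h2 := htf; unfold pvTF at h2; exact List.find?_eq_none.mp h2
    have hfind : (pvIndices pat line).tail.find? (pvHitT pat o) = none := by
      rw [List.find?_eq_none]
      intro j hj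
      rcases (htailmem j).mp hj with ⟨hjidx, hj0⟩
      rcases (pvMem_indices pat line j).mp hjidx with ⟨k, hk, rfl, hkline⟩
      intro hhitj
      rw [pvHitT_pred pat o k hk] at hhitj
      obtain ⟨hkodd, hgb⟩ := hhitj
      refine hnone (((k + 1) / 2 : Nat) : Int) (by rw [PySem.List.mem_pyRange_one]; omega) ?_
      rw [decide_eq_true (by push_cast; omega : 2 * ((((k + 1) / 2 : Nat)) : Int) ≤ (pat.length : Int)),
        Bool.true_and]
      exact hgb
    rw [hfind]

-- S2: A's bottom inner loop over indices[:-1] (line = last row) computes pvBF, falling back to sym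
theorem pvS2_eq (pat : List (List String)) (o : Option Int) (line : List String)
    (hl : pat.getLast? = some line) (sym : Option Int) :
    pvBotLoop pat o ((pat.length : Int) - 1) (PySem.List.slice (pvIndices pat line) none (some (-1))) sym
      = match pvBF pat o with | some q => some q | none => sym := by
  have hne : pat ≠ [] := by rintro rfl; cases hl
  have h0 : 0 < pat.length := List.length_pos_iff.mpr hne
  have hlastline : pat[pat.length - 1]'(by omega) = line := by
    rw [List.getLast?_eq_getElem?] at hl
    obtain ⟨hw, he⟩ := List.getElem?_eq_some_iff.mp hl
    exact he
  have hsorted := pvPairwise_indices pat line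
  have hlastmem : ((pat.length - 1 : Nat) : Int) ∈ pvIndices pat line :=
    (pvMem_indices pat line _).mpr ⟨pat.length - 1, by omega, rfl, hlastline⟩
  have hub : ∀ y ∈ pvIndices pat line, y ≤ ((pat.length - 1 : Nat) : Int) := by
    intro y hy
    rcases (pvMem_indices pat line y).mp hy with ⟨k, hk, rfl, -⟩
    omega
  have hglast : (pvIndices pat line).getLast? = some ((pat.length - 1 : Nat) : Int) :=
    pvSorted_getLast? hsorted hlastmem hub
  have hdlmem := pvSorted_dropLast_mem hsorted hglast
  have hdsorted : (pvIndices pat line).dropLast.Pairwise (· < ·) :=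
    hsorted.sublist (List.dropLast_sublist _)
  rw [PySem.List.slice_to_neg_one, pvBotLoop_eq]
  cases hbf : pvBF pat o with
  | some q =>
    obtain ⟨qN, rfl, hq2, hqn, hPalD, hneq⟩ := pvBF_some_bot pat o q hbf
    have hmin : ∀ y ∈ PySem.List.pyRange 1 (pat.length : Int) 1, y < (qN : Int) →
        (decide ((pat.length : Int) ≤ 2 * y) && pvGoodB pat o y) = false := by
      have h2 := hbf
      unfold pvBF at h2
      rw [pvFind?_sorted_eq_some (PySem.List.pairwise_lt_pyRange_one _ _)] at h2
      exact h2.2.2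
    have hs0cast : ((2 * qN - pat.length : Nat) : Int) = 2 * (qN : Int) - pat.length := by
      push_cast; omega
    have hs0mem : ((2 * qN - pat.length : Nat) : Int) ∈ (pvIndices pat line).dropLast := by
      rw [hdlmem]
      refine ⟨(pvMem_indices pat line _).mpr ⟨2 * qN - pat.length, by omega, rfl,
        (pvPalD_edge pat qN hq2 hqn hPalD).trans hlastline⟩, ?_⟩
      intro hc
      omega
    have hhit0 : pvHitB pat o ((pat.length : Int) - 1) ((2 * qN - pat.length : Nat) : Int) = true := by
      rw [pvHitB_pred pat o _ (by omega)]
      refine ⟨by omega, ?_⟩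
      have e : (2 * qN - pat.length + pat.length) / 2 = qN := by omega
      rw [e]
      unfold pvGoodB
      rw [show pvAltCheck pat (pat.length : Int) ((qN : Nat) : Int) = true from
        (pvAltCheck_bot pat qN hq2 hqn).mpr hPalD, Bool.and_true,
        beq_eq_false_iff_ne.mpr hneq]
      rfl
    have hfind : (pvIndices pat line).dropLast.find? (pvHitB pat o ((pat.length : Int) - 1))
        = some ((2 * qN - pat.length : Nat) : Int) := by
      rw [pvFind?_sorted_eq_some hdsorted]
      refine ⟨hs0mem, hhit0, ?_⟩
      intro j hj hjlt
      rcases (hdlmem j).mp hj with ⟨hjidx, hj0⟩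
      rcases (pvMem_indices pat line j).mp hjidx with ⟨k, hk, rfl, hkline⟩
      by_contra hcb
      have hhitj : pvHitB pat o ((pat.length : Int) - 1) (k : Int) = true := by
        revert hcb; cases pvHitB pat o ((pat.length : Int) - 1) (k : Int) <;> simp
      rw [pvHitB_pred pat o k hk] at hhitj
      obtain ⟨hkeven, hgb⟩ := hhitj
      have hklt : k < 2 * qN - pat.length := by omega
      have hm := hmin (((k + pat.length) / 2 : Nat) : Int)
        (by rw [PySem.List.mem_pyRange_one]; omega) (by omega)
      rw [decide_eq_true
        (by push_cast; omega : (pat.length : Int) ≤ 2 * ((((k + pat.length) / 2 : Nat)) : Int)),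
        Bool.true_and] at hm
      rw [hm] at hgb
      cases hgb
    rw [hfind]
    rw [show ((2 * qN - pat.length : Nat) : Int) = 2 * (qN : Int) - pat.length from hs0cast]
    exact pvCheck_bot_pos pat qN hq2 hqn hPalD
  | none =>
    have hnone : ∀ x ∈ PySem.List.pyRange 1 (pat.length : Int) 1,
        ¬ ((decide ((pat.length : Int) ≤ 2 * x) && pvGoodB pat o x) = true) := by
      have h2 := hbf; unfold pvBF at h2; exact List.find?_eq_none.mp h2
    have hfind : (pvIndices pat line).dropLast.find? (pvHitB pat o ((pat.length : Int) - 1)) = none := by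
      rw [List.find?_eq_none]
      intro j hj
      rcases (hdlmem j).mp hj with ⟨hjidx, hj0⟩
      rcases (pvMem_indices pat line j).mp hjidx with ⟨k, hk, rfl, hkline⟩
      intro hhitj
      rw [pvHitB_pred pat o k hk] at hhitj
      obtain ⟨hkeven, hgb⟩ := hhitj
      refine hnone (((k + pat.length) / 2 : Nat) : Int)
        (by rw [PySem.List.mem_pyRange_one]; omega) ?_
      rw [decide_eq_true
        (by push_cast; omega : (pat.length : Int) ≤ 2 * ((((k + pat.length) / 2 : Nat)) : Int)),
        Bool.true_and]
      exact hgb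
    rw [hfind]

theorem pvTF_pos (pat : List (List String)) (o : Option Int) (p : Int) (h : pvTF pat o = some p) :
    1 ≤ p := by
  have := List.mem_of_find?_eq_some h
  rw [PySem.List.mem_pyRange_one] at this
  omega

theorem pvBF_pos (pat : List (List String)) (o : Option Int) (p : Int) (h : pvBF pat o = some p) :
    1 ≤ p := by
  have := List.mem_of_find?_eq_some h
  rw [PySem.List.mem_pyRange_one] at this
  omega

theorem pvBody_skip (pat : List (List String)) (o : Option Int) (line : List String) (sym : Option Int)
    (hh : pat[0]? ≠ some line) (hl : pat.getLast? ≠ some line) :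
    pvBody pat o ((pat.length : Int) - 1) line sym = sym := by
  simp only [pvBody]
  by_cases hc : (PySem.List.count pat line == 1) = true
  · rw [if_pos hc]
  · rw [if_neg hc, if_pos]
    rintro (h0m | hLm)
    · rcases (pvMem_indices pat line 0).mp h0m with ⟨k, hk, hk0, hkline⟩
      have hk0' : k = 0 := by omega
      subst hk0'
      exact hh (List.getElem?_eq_some_iff.mpr ⟨hk, hkline⟩)
    · rcases (pvMem_indices pat line _).mp hLm with ⟨k, hk, hkeq, hkline⟩
      have hk' : k = pat.length - 1 := by omega
      subst hk'
      apply hl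
      rw [List.getLast?_eq_getElem?]
      exact List.getElem?_eq_some_iff.mpr ⟨by omega, hkline⟩

theorem pvBody_head (pat : List (List String)) (o : Option Int) (line : List String)
    (hh : pat[0]? = some line) (hl : pat.getLast? ≠ some line) :
    pvBody pat o ((pat.length : Int) - 1) line none = pvTF pat o := by
  obtain ⟨h0, hline⟩ := List.getElem?_eq_some_iff.mp hh
  simp only [pvBody]
  by_cases hc : (PySem.List.count pat line == 1) = true
  · rw [if_pos hc]
    cases htf : pvTF pat o with
    | none => rfl
    | some p =>
      exfalso
      obtain ⟨pN, rfl, hp1, h2p, hpn, hPal, hne⟩ := pvTF_some_top pat o _ htf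
      have h2c := pvTwo_le_count pat line 0 (2 * pN - 1) (by omega) (by omega) hline
        ((pvPalT_edge pat pN hp1 h2p hPal).trans hline)
      have hc1 : PySem.List.count pat line = 1 := beq_iff_eq.mp hc
      omega
  · rw [if_neg hc]
    have h0mem : (0 : Int) ∈ pvIndices pat line :=
      (pvMem_indices pat line 0).mpr ⟨0, h0, by simp, hline⟩
    rw [if_neg (by intro hneg; exact hneg (Or.inl h0mem))]
    have hsorted := pvPairwise_indices pat line
    have hnn : ∀ y ∈ pvIndices pat line, (0 : Int) ≤ y := by
      intro y hy
      rcases (pvMem_indices pat line y).mp hy with ⟨k, hk, rfl, -⟩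
      omega
    have hhead : (pvIndices pat line).head? = some 0 := pvSorted_head? hsorted h0mem hnn
    have hg0 : PySem.List.pyGet? (pvIndices pat line) 0 = some 0 := by
      rw [PySem.List.pyGet?_zero, ← List.head?_eq_getElem?]
      exact hhead
    rw [if_pos (show (PySem.List.pyGet? (pvIndices pat line) 0 == some (0 : Int)) = true from by
      rw [hg0]; rfl)]
    have hidxne : pvIndices pat line ≠ [] := List.ne_nil_of_mem h0mem
    obtain ⟨j, hgl⟩ : ∃ j, (pvIndices pat line).getLast? = some j :=
      ⟨_, List.getLast?_eq_getLast hidxne⟩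
    rcases (pvMem_indices pat line j).mp (List.mem_of_getLast? hgl) with ⟨k, hk, rfl, hkline⟩
    have hkneq : k ≠ pat.length - 1 := by
      intro hk2
      subst hk2
      apply hl
      rw [List.getLast?_eq_getElem?]
      exact List.getElem?_eq_some_iff.mpr ⟨by omega, hkline⟩
    have hcond : (PySem.List.pyGet? (pvIndices pat line) (-1) == some ((pat.length : Int) - 1)) = false := by
      rw [PySem.List.pyGet?_neg_one, hgl, beq_eq_false_iff_ne]
      intro hcc
      have := Option.some.inj hcc
      omega
    rw [if_neg (by rw [hcond]; exact Bool.false_ne_true)]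
    exact pvS1_eq pat o line hh

theorem pvBody_head_last (pat : List (List String)) (o : Option Int) (line : List String)
    (hh : pat[0]? = some line) (hl : pat.getLast? = some line) :
    pvBody pat o ((pat.length : Int) - 1) line none
      = match pvBF pat o with | some q => some q | none => pvTF pat o := by
  obtain ⟨h0, hline⟩ := List.getElem?_eq_some_iff.mp hh
  have hlastline : pat[pat.length - 1]'(by omega) = line := by
    rw [List.getLast?_eq_getElem?] at hl
    obtain ⟨hw, he⟩ := List.getElem?_eq_some_iff.mp hl
    exact he
  simp only [pvBody]
  by_cases hc : (PySem.List.count pat line == 1) = true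
  · rw [if_pos hc]
    have hc1 : PySem.List.count pat line = 1 := beq_iff_eq.mp hc
    cases hbf : pvBF pat o with
    | some q =>
      exfalso
      obtain ⟨qN, rfl, hq2, hqn, hPalD, hneq⟩ := pvBF_some_bot pat o _ hbf
      have h2c := pvTwo_le_count pat line (2 * qN - pat.length) (pat.length - 1)
        (by omega) (by omega) ((pvPalD_edge pat qN hq2 hqn hPalD).trans hlastline) hlastline
      omega
    | none =>
      cases htf : pvTF pat o with
      | some p =>
        exfalso
        obtain ⟨pN, rfl, hp1, h2p, hpn, hPal, hne⟩ := pvTF_some_top pat o _ htf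
        have h2c := pvTwo_le_count pat line 0 (2 * pN - 1) (by omega) (by omega) hline
          ((pvPalT_edge pat pN hp1 h2p hPal).trans hline)
        omega
      | none => rfl
  · rw [if_neg hc]
    have h0mem : (0 : Int) ∈ pvIndices pat line :=
      (pvMem_indices pat line 0).mpr ⟨0, h0, by simp, hline⟩
    rw [if_neg (by intro hneg; exact hneg (Or.inl h0mem))]
    have hsorted := pvPairwise_indices pat line
    have hnn : ∀ y ∈ pvIndices pat line, (0 : Int) ≤ y := by
      intro y hy
      rcases (pvMem_indices pat line y).mp hy with ⟨k, hk, rfl, -⟩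
      omega
    have hhead : (pvIndices pat line).head? = some 0 := pvSorted_head? hsorted h0mem hnn
    have hg0 : PySem.List.pyGet? (pvIndices pat line) 0 = some 0 := by
      rw [PySem.List.pyGet?_zero, ← List.head?_eq_getElem?]
      exact hhead
    rw [if_pos (show (PySem.List.pyGet? (pvIndices pat line) 0 == some (0 : Int)) = true from by
      rw [hg0]; rfl)]
    have hlastmem : ((pat.length - 1 : Nat) : Int) ∈ pvIndices pat line :=
      (pvMem_indices pat line _).mpr ⟨pat.length - 1, by omega, rfl, hlastline⟩
    have hub : ∀ y ∈ pvIndices pat line, y ≤ ((pat.length - 1 : Nat) : Int) := by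
      intro y hy
      rcases (pvMem_indices pat line y).mp hy with ⟨k, hk, rfl, -⟩
      omega
    have hglast : (pvIndices pat line).getLast? = some ((pat.length - 1 : Nat) : Int) :=
      pvSorted_getLast? hsorted hlastmem hub
    have hcond : (PySem.List.pyGet? (pvIndices pat line) (-1) == some ((pat.length : Int) - 1)) = true := by
      rw [PySem.List.pyGet?_neg_one, hglast, beq_iff_eq]
      congr 1
      omega
    rw [if_pos hcond, pvS1_eq pat o line hh]
    exact pvS2_eq pat o line hl (pvTF pat o)

theorem pvBody_last (pat : List (List String)) (o : Option Int) (line : List String)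
    (hh : pat[0]? ≠ some line) (hl : pat.getLast? = some line) :
    pvBody pat o ((pat.length : Int) - 1) line none
      = match pvBF pat o with | some q => some q | none => none := by
  have hne : pat ≠ [] := by rintro rfl; cases hl
  have h0 : 0 < pat.length := List.length_pos_iff.mpr hne
  have hlastline : pat[pat.length - 1]'(by omega) = line := by
    rw [List.getLast?_eq_getElem?] at hl
    obtain ⟨hw, he⟩ := List.getElem?_eq_some_iff.mp hl
    exact he
  simp only [pvBody]
  by_cases hc : (PySem.List.count pat line == 1) = true
  · rw [if_pos hc]
    have hc1 : PySem.List.count pat line = 1 := beq_iff_eq.mp hc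
    cases hbf : pvBF pat o with
    | some q =>
      exfalso
      obtain ⟨qN, rfl, hq2, hqn, hPalD, hneq⟩ := pvBF_some_bot pat o _ hbf
      have h2c := pvTwo_le_count pat line (2 * qN - pat.length) (pat.length - 1)
        (by omega) (by omega) ((pvPalD_edge pat qN hq2 hqn hPalD).trans hlastline) hlastline
      omega
    | none => rfl
  · rw [if_neg hc]
    have hlastmem : ((pat.length - 1 : Nat) : Int) ∈ pvIndices pat line :=
      (pvMem_indices pat line _).mpr ⟨pat.length - 1, by omega, rfl, hlastline⟩
    have hmImem : ((pat.length : Int) - 1) ∈ pvIndices pat line := by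
      have e : ((pat.length : Int) - 1) = ((pat.length - 1 : Nat) : Int) := by omega
      rw [e]
      exact hlastmem
    rw [if_neg (by intro hneg; exact hneg (Or.inr hmImem))]
    have hsorted := pvPairwise_indices pat line
    have hidxne : pvIndices pat line ≠ [] := List.ne_nil_of_mem hlastmem
    have hhd : (pvIndices pat line).head? = some ((pvIndices pat line).head hidxne) :=
      List.head?_eq_head hidxne
    rcases (pvMem_indices pat line _).mp (List.head_mem hidxne) with ⟨k, hk, hkeq, hkline⟩
    have hk0 : k ≠ 0 := by
      intro hk0
      subst hk0
      exact hh (List.getElem?_eq_some_iff.mpr ⟨hk, hkline⟩)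
    have hcond0 : (PySem.List.pyGet? (pvIndices pat line) 0 == some (0 : Int)) = false := by
      rw [PySem.List.pyGet?_zero, ← List.head?_eq_getElem?, hhd, beq_eq_false_iff_ne]
      intro hcc
      have := Option.some.inj hcc
      omega
    rw [if_neg (show ¬ (PySem.List.pyGet? (pvIndices pat line) 0 == some (0 : Int)) = true from by
      rw [hcond0]; exact Bool.false_ne_true)]
    have hub : ∀ y ∈ pvIndices pat line, y ≤ ((pat.length - 1 : Nat) : Int) := by
      intro y hy
      rcases (pvMem_indices pat line y).mp hy with ⟨k2, hk2, rfl, -⟩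
      omega
    have hglast : (pvIndices pat line).getLast? = some ((pat.length - 1 : Nat) : Int) :=
      pvSorted_getLast? hsorted hlastmem hub
    have hcond : (PySem.List.pyGet? (pvIndices pat line) (-1) == some ((pat.length : Int) - 1)) = true := by
      rw [PySem.List.pyGet?_neg_one, hglast, beq_iff_eq]
      congr 1
      omega
    rw [if_pos hcond]
    exact pvS2_eq pat o line hl none

theorem pvOuter_break (pat : List (List String)) (o : Option Int) (mI : Int)
    (l : List (List String)) (sym : Option Int) (h : pvTruthy sym = true) :
    pvOuter pat o mI l sym = sym := by
  cases l with
  | nil => rfl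
  | cons line rest => show (if pvTruthy sym then sym else _) = sym; rw [if_pos h]

theorem pvOuter_scan (pat : List (List String)) (o : Option Int) (mI : Int)
    (lineL : List String) (S2 : Option Int)
    (hb : ∀ line, line ≠ lineL → pvBody pat o mI line none = none)
    (hL : pvBody pat o mI lineL none = S2)
    (hv : S2 = none ∨ ∃ v, S2 = some v ∧ v ≠ 0) :
    ∀ l, pvOuter pat o mI l none = if lineL ∈ l then S2 else none := by
  intro l
  induction l with
  | nil => simp [pvOuter]
  | cons line rest ih =>
    show (if pvTruthy none then none else pvOuter pat o mI rest (pvBody pat o mI line none))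
      = if lineL ∈ line :: rest then S2 else none
    rw [if_neg (by simp [pvTruthy])]
    by_cases hline : line = lineL
    · subst hline
      rw [hL, if_pos List.mem_cons_self]
      rcases hv with rfl | ⟨v, rfl, hv0⟩
      · rw [ih]
        split <;> rfl
      · exact pvOuter_break pat o mI rest (some v) (by simp [pvTruthy, hv0])
    · rw [hb line hline, ih]
      by_cases hmem : lineL ∈ rest
      · rw [if_pos hmem, if_pos (List.mem_cons_of_mem _ hmem)]
      · rw [if_neg hmem, if_neg (by
          intro hc
          rcases List.mem_cons.mp hc with rfl | hc2
          · exact hline rfl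
          · exact hmem hc2)]

theorem pvAltLoop_eq (pat : List (List String)) (o : Option Int) (nI : Int) (l : List Int) :
    pvAltLoop pat o nI l = l.find? (fun p => (!(some p == o)) && pvAltCheck pat nI p) := by
  induction l with
  | nil => rfl
  | cons p rest ih =>
    rw [List.find?_cons]
    show (if some p == o then pvAltLoop pat o nI rest
          else if pvAltCheck pat nI p then some p else pvAltLoop pat o nI rest) = _
    by_cases h1 : (some p == o) = true
    · rw [if_pos h1, ih]
      have : ((!(some p == o)) && pvAltCheck pat nI p) = false := by rw [h1]; rfl
      rw [this]
    · by_cases h2 : pvAltCheck pat nI p = true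
      · rw [if_neg h1, if_pos h2]
        have : ((!(some p == o)) && pvAltCheck pat nI p) = true := by
          rw [Bool.eq_false_iff.mpr h1, h2]; rfl
        rw [this]
      · rw [if_neg h1, if_neg h2, ih]
        have : ((!(some p == o)) && pvAltCheck pat nI p) = false := by
          rw [Bool.eq_false_iff.mpr h2, Bool.and_false]
        rw [this]

-- B computes: first top-anchored reflection if any, else first bottom-anchored one
theorem pvB_eq (pat : List (List String)) (o : Option Int) :
    find_row_symmetry_alt pat o
      = match pvTF pat o with | some p => some p | none => pvBF pat o := by
  show pvAltLoop pat o (PySem.List.len pat) (PySem.List.pyRange 1 (PySem.List.len pat) 1) = _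
  simp only [PySem.List.len_eq]
  rw [pvAltLoop_eq]
  have hfold : (fun p => (!(some p == o)) && pvAltCheck pat ((pat.length : Nat) : Int) p) = pvGoodB pat o := rfl
  rw [hfold]
  cases htf : pvTF pat o with
  | some p =>
    unfold pvTF at htf
    rw [pvFind?_sorted_eq_some (PySem.List.pairwise_lt_pyRange_one 1 (pat.length : Int)) _ p] at htf
    obtain ⟨hmem, hpred, hmin⟩ := htf
    have h2p : (2 * p ≤ (pat.length : Int)) := by
      by_contra hc
      rw [decide_eq_false hc, Bool.false_and] at hpred
      cases hpred
    have hg : pvGoodB pat o p = true := by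
      rw [decide_eq_true h2p, Bool.true_and] at hpred
      exact hpred
    rw [pvFind?_sorted_eq_some (PySem.List.pairwise_lt_pyRange_one 1 (pat.length : Int))]
    refine ⟨hmem, hg, ?_⟩
    intro y hy hylt
    by_cases hgy : pvGoodB pat o y = true
    · have := hmin y hy hylt
      rw [decide_eq_true (by omega : 2 * y ≤ (pat.length : Int)), Bool.true_and] at this
      rw [this] at hgy
      cases hgy
    · exact Bool.eq_false_iff.mpr hgy
  | none =>
    unfold pvTF at htf
    rw [List.find?_eq_none] at htf
    have hcg : ∀ x ∈ PySem.List.pyRange 1 (pat.length : Int) 1,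
        pvGoodB pat o x = (decide ((pat.length : Int) ≤ 2 * x) && pvGoodB pat o x) := by
      intro x hx
      cases hgx : pvGoodB pat o x with
      | false => rw [Bool.and_false]
      | true =>
        have hnx : ¬ (2 * x ≤ (pat.length : Int)) := by
          intro hc
          exact htf x hx (by rw [decide_eq_true hc, Bool.true_and, hgx])
        rw [decide_eq_true (by omega : (pat.length : Int) ≤ 2 * x), Bool.true_and]
    rw [pvFind?_congr hcg]
    rfl

-- A computes the same, except that with equal first/last rows the bottom result wins
theorem pvA_eq (pat : List (List String)) (o : Option Int) :
    find_row_symmetry pat o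
      = if pat.head? = pat.getLast? then
          (match pvBF pat o with | some q => some q | none => pvTF pat o)
        else
          (match pvTF pat o with | some p => some p | none => pvBF pat o) := by
  cases pat with
  | nil =>
    have hbf : pvBF ([] : List (List String)) o = none := by
      unfold pvBF
      rw [PySem.List.pyRange_one_eq_nil (by simp)]
      rfl
    have htf : pvTF ([] : List (List String)) o = none := by
      unfold pvTF
      rw [PySem.List.pyRange_one_eq_nil (by simp)]
      rfl
    rw [if_pos (show ([] : List (List String)).head? = ([] : List (List String)).getLast? from rfl),
      hbf, htf]
    rfl
  | cons line0 rest =>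
    have hh0 : (line0 :: rest)[0]? = some line0 := rfl
    have hne : (line0 :: rest) ≠ [] := by simp
    obtain ⟨lastL, hlast⟩ : ∃ L, (line0 :: rest).getLast? = some L :=
      ⟨_, List.getLast?_eq_getLast hne⟩
    have hstep : find_row_symmetry (line0 :: rest) o
        = pvOuter (line0 :: rest) o (((line0 :: rest).length : Int) - 1) rest
            (pvBody (line0 :: rest) o (((line0 :: rest).length : Int) - 1) line0 none) := by
      show pvOuter _ o (PySem.List.len (line0 :: rest) - 1) (line0 :: rest) none = _
      simp only [PySem.List.len_eq]
      show (if pvTruthy none then _ else _) = _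
      rw [if_neg (by simp [pvTruthy])]
    rw [hstep, hlast]
    simp only [List.head?_cons]
    by_cases hEq : line0 = lastL
    · subst hEq
      rw [if_pos rfl]
      have hbody := pvBody_head_last (line0 :: rest) o line0 hh0 hlast
      cases hbf : pvBF (line0 :: rest) o with
      | some q =>
        simp only [hbf] at hbody
        rw [hbody]
        exact pvOuter_break _ o _ rest (some q)
          (by have := pvBF_pos _ o q hbf; simp [pvTruthy]; omega)
      | none =>
        simp only [hbf] at hbody
        cases htf : pvTF (line0 :: rest) o with
        | some p =>
          simp only [htf] at hbody
          rw [hbody]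
          exact pvOuter_break _ o _ rest (some p)
            (by have := pvTF_pos _ o p htf; simp [pvTruthy]; omega)
        | none =>
          simp only [htf] at hbody
          have hb2 : ∀ line, line ≠ line0 →
              pvBody (line0 :: rest) o (((line0 :: rest).length : Int) - 1) line none = none := by
            intro line hlneq
            exact pvBody_skip _ o line none
              (by intro hc; exact hlneq (Option.some.inj hc).symm)
              (by rw [hlast]; intro hc; exact hlneq (Option.some.inj hc).symm)
          have hscan := pvOuter_scan (line0 :: rest) o (((line0 :: rest).length : Int) - 1)
            line0 none hb2 hbody (Or.inl rfl) rest
          rw [hbody, hscan]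
          split <;> rfl
    · rw [if_neg (by intro hc; exact hEq (Option.some.inj hc))]
      have hl0 : (line0 :: rest).getLast? ≠ some line0 := by
        rw [hlast]
        intro hc
        exact hEq (Option.some.inj hc).symm
      have hbody := pvBody_head (line0 :: rest) o line0 hh0 hl0
      cases htf : pvTF (line0 :: rest) o with
      | some p =>
        simp only [htf] at hbody
        rw [hbody]
        rw [pvOuter_break _ o _ rest (some p)
          (by have := pvTF_pos _ o p htf; simp [pvTruthy]; omega)]
      | none =>
        simp only [htf] at hbody
        have hrne : rest ≠ [] := by
          intro hr
          subst hr
          have h2 : some line0 = some lastL := by rw [← hlast]; rfl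
          exact hEq (Option.some.inj h2)
        have hlastmem : lastL ∈ rest := by
          cases rest with
          | nil => exact absurd rfl hrne
          | cons b t =>
            rw [List.getLast?_cons_cons] at hlast
            exact List.mem_of_getLast? hlast
        have hS2 := pvBody_last (line0 :: rest) o lastL
          (by intro hc; exact hEq (Option.some.inj hc)) hlast
        have hb2 : ∀ line, line ≠ lastL →
            pvBody (line0 :: rest) o (((line0 :: rest).length : Int) - 1) line none = none := by
          intro line hlneq
          by_cases hll : line = line0
          · subst hll; exact hbody
          · exact pvBody_skip _ o line none
              (by intro hc; exact hll (Option.some.inj hc).symm)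
              (by rw [hlast]; intro hc; exact hlneq (Option.some.inj hc).symm)
        cases hbf : pvBF (line0 :: rest) o with
        | some q =>
          simp only [hbf] at hS2
          have hscan := pvOuter_scan (line0 :: rest) o (((line0 :: rest).length : Int) - 1)
            lastL (some q) hb2 hS2
            (Or.inr ⟨q, rfl, by have := pvBF_pos _ o q hbf; omega⟩) rest
          rw [hbody, hscan, if_pos hlastmem]
        | none =>
          simp only [hbf] at hS2
          have hscan := pvOuter_scan (line0 :: rest) o (((line0 :: rest).length : Int) - 1)
            lastL none hb2 hS2 (Or.inl rfl) rest
          rw [hbody, hscan]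
          split <;> rfl

theorem pvTF_min (pat : List (List String)) (o : Option Int) (p : Int) (h : pvTF pat o = some p)
    (y : Int) (hy : 1 ≤ y) (hyn : y < pat.length) (hg : (2 * y ≤ (pat.length : Int) ∧ pvGoodB pat o y = true)) :
    p ≤ y := by
  unfold pvTF at h
  rw [pvFind?_sorted_eq_some (PySem.List.pairwise_lt_pyRange_one 1 (pat.length : Int)) _ p] at h
  obtain ⟨-, -, hmin⟩ := h
  by_contra hc
  have := hmin y (by rw [PySem.List.mem_pyRange_one]; omega) (by omega)
  rw [decide_eq_true hg.1, Bool.true_and, hg.2] at this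
  cases this

theorem pvBF_min (pat : List (List String)) (o : Option Int) (q : Int) (h : pvBF pat o = some q)
    (y : Int) (hy : 1 ≤ y) (hyn : y < pat.length) (hg : ((pat.length : Int) ≤ 2 * y ∧ pvGoodB pat o y = true)) :
    q ≤ y := by
  unfold pvBF at h
  rw [pvFind?_sorted_eq_some (PySem.List.pairwise_lt_pyRange_one 1 (pat.length : Int)) _ q] at h
  obtain ⟨-, -, hmin⟩ := h
  by_contra hc
  have := hmin y (by rw [PySem.List.mem_pyRange_one]; omega) (by omega)
  rw [decide_eq_true hg.1, Bool.true_and, hg.2] at this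
  cases this


-- bridges: pvRef on dropLast / reverse is exactly "a strict top reflection" / "a bottom reflection"
theorem pvRef_iff_pairs (g : List (List String)) (o : Option Int) :
    pvRef g o ↔ ∃ p : Nat, 0 < p ∧ 2 * p ≤ g.length ∧
      (∀ k, k < p → g[p - 1 - k]? = g[p + k]?) ∧ (p : Int) ∉ o := by
  constructor
  · rintro ⟨p, hplt, hp0, heq, hpo⟩
    have hlen := congrArg List.length heq
    rw [List.length_reverse, List.length_take, List.length_take, List.length_drop] at hlen
    have h2p : 2 * p ≤ g.length := by omega
    refine ⟨p, hp0, h2p, ?_, hpo⟩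
    intro k hk
    have hk2 := congrArg (fun l => l[k]?) heq
    simp only [] at hk2
    rw [List.getElem?_reverse (by rw [List.length_take]; omega), List.length_take] at hk2
    rw [List.getElem?_take_of_lt (by omega), List.getElem?_take_of_lt hk, List.getElem?_drop] at hk2
    have e : min p g.length - 1 - k = p - 1 - k := by omega
    rw [e] at hk2
    exact hk2
  · rintro ⟨p, hp0, h2p, hpair, hpo⟩
    refine ⟨p, by omega, hp0, ?_, hpo⟩
    apply List.ext_getElem?
    intro k
    by_cases hk : k < p
    · rw [List.getElem?_reverse (by rw [List.length_take]; omega), List.length_take,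
        List.getElem?_take_of_lt (by omega), List.getElem?_take_of_lt hk, List.getElem?_drop]
      have e : min p g.length - 1 - k = p - 1 - k := by omega
      rw [e]
      exact hpair k hk
    · rw [List.getElem?_eq_none (by rw [List.length_reverse, List.length_take]; omega),
        List.getElem?_eq_none (by rw [List.length_take, List.length_drop]; omega)]

theorem pvPalT_iff_pairs (pat : List (List String)) (p : Nat) (h2p : 2 * p ≤ pat.length) :
    (∀ k, k < p → pat[p - 1 - k]? = pat[p + k]?) ↔ PalT pat p := by
  rw [pvPairs_iff_palin pat p p (le_refl p) (by omega)]
  simp [PalT]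

theorem pvPalD_iff_pairs (pat : List (List String)) (q : Nat) (hq2 : pat.length ≤ 2 * q)
    (hqn : q < pat.length) :
    (∀ k, k < pat.length - q → pat[q - 1 - k]? = pat[q + k]?) ↔ PalD pat q := by
  rw [pvPairs_iff_palin pat q (pat.length - q) (by omega) (by omega)]
  have e1 : q - (pat.length - q) = 2 * q - pat.length := by omega
  rw [e1]
  have e2 : (pat.drop (2 * q - pat.length)).take (2 * (pat.length - q))
      = pat.drop (2 * q - pat.length) := by
    apply List.take_of_length_le
    rw [List.length_drop]
    omega
  rw [e2]

theorem pvRef_dropLast (pat : List (List String)) (o : Option Int) :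
    pvRef pat.dropLast o ↔
      ∃ p : Nat, 1 ≤ p ∧ 2 * p < pat.length ∧ PalT pat p ∧ some (p : Int) ≠ o := by
  rw [pvRef_iff_pairs]
  have hdl : ∀ j, j < pat.length - 1 → pat.dropLast[j]? = pat[j]? := by
    intro j hj
    rw [List.dropLast_eq_take, List.getElem?_take_of_lt hj]
  rw [List.length_dropLast]
  constructor
  · rintro ⟨p, hp0, h2p, hpair, hpo⟩
    refine ⟨p, hp0, by omega, ?_, ?_⟩
    · rw [← pvPalT_iff_pairs pat p (by omega)]
      intro k hk
      rw [← hdl (p - 1 - k) (by omega), ← hdl (p + k) (by omega)]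
      exact hpair k hk
    · intro hc
      exact hpo (Option.mem_def.mpr hc.symm)
  · rintro ⟨p, hp1, h2p, hPal, hne⟩
    refine ⟨p, hp1, by omega, ?_, ?_⟩
    · intro k hk
      rw [hdl (p - 1 - k) (by omega), hdl (p + k) (by omega)]
      exact (pvPalT_iff_pairs pat p (by omega)).mpr hPal k hk
    · intro hmem
      exact hne (Option.mem_def.mp hmem).symm

theorem pvRef_reverse (pat : List (List String)) (o : Option Int) :
    pvRef pat.reverse (o.map (fun v => (pat.length : Int) - v)) ↔
      ∃ q : Nat, pat.length ≤ 2 * q ∧ q < pat.length ∧ PalD pat q ∧ some (q : Int) ≠ o := by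
  rw [pvRef_iff_pairs, List.length_reverse]
  constructor
  · rintro ⟨p, hp0, h2p, hpair, hpo⟩
    refine ⟨pat.length - p, by omega, by omega, ?_, ?_⟩
    · rw [← pvPalD_iff_pairs pat (pat.length - p) (by omega) (by omega)]
      intro k hk
      have hk' : k < p := by omega
      have h1 := hpair k hk'
      rw [List.getElem?_reverse (by omega), List.getElem?_reverse (by omega)] at h1
      have e1 : pat.length - 1 - (p - 1 - k) = pat.length - p + k := by omega
      have e2 : pat.length - 1 - (p + k) = pat.length - p - 1 - k := by omega
      rw [e1, e2] at h1
      exact h1.symm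
    · intro hc
      apply hpo
      rw [← hc]
      simp only [Option.map_some, Option.mem_def, Option.some.injEq]
      omega
  · rintro ⟨q, hq2, hqn, hPalD, hne⟩
    refine ⟨pat.length - q, by omega, by omega, ?_, ?_⟩
    · intro k hk
      have hk' : k < pat.length - q := by omega
      have h1 := (pvPalD_iff_pairs pat q hq2 hqn).mpr hPalD k hk'
      rw [List.getElem?_reverse (by omega), List.getElem?_reverse (by omega)]
      have e1 : pat.length - 1 - (pat.length - q - 1 - k) = q + k := by omega
      have e2 : pat.length - 1 - (pat.length - q + k) = q - 1 - k := by omega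
      rw [e1, e2]
      exact h1.symm
    · intro hmem
      simp only [Option.mem_def, Option.map_eq_some_iff] at hmem
      obtain ⟨v, hv, he⟩ := hmem
      apply hne
      rw [hv]
      congr 1
      omega

theorem pvD_iff (pattern : List (List String)) (old_symmetry : Option Int) :
    D_find_row_symmetry pattern old_symmetry ↔
      (pattern.head? = pattern.getLast? ∧
       (∃ p : Nat, 1 ≤ p ∧ 2 * p < pattern.length ∧ PalT pattern p ∧ some (p : Int) ≠ old_symmetry) ∧
       (∃ q : Nat, pattern.length ≤ 2 * q ∧ q < pattern.length ∧ PalD pattern q ∧ some (q : Int) ≠ old_symmetry)) := by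
  unfold D_find_row_symmetry
  rw [pvRef_dropLast, pvRef_reverse]

-- ===== VERDICT =====
theorem find_row_symmetry_spec : Claim_unchanged_find_row_symmetry := by
  intro pat o hDom
  unfold Spec_find_row_symmetry
  intro hnD
  rw [pvA_eq, pvB_eq]
  by_cases hHL : pat.head? = pat.getLast?
  · rw [if_pos hHL]
    cases hbf : pvBF pat o with
    | none => cases htf : pvTF pat o <;> simp
    | some q =>
      cases htf : pvTF pat o with
      | none => simp
      | some p =>
        obtain ⟨pN, rfl, hp1, h2p, hpn, hPal, hne⟩ := pvTF_some_top pat o p htf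
        obtain ⟨qN, rfl, hq2, hqn, hPalD, hneq⟩ := pvBF_some_bot pat o q hbf
        show some ((qN : Nat) : Int) = some ((pN : Nat) : Int)
        have h2pn : 2 * pN = pat.length := by
          by_contra hne2
          exact hnD ((pvD_iff pat o).mpr
            ⟨hHL, ⟨pN, hp1, by omega, hPal, hne⟩, ⟨qN, hq2, hqn, hPalD, hneq⟩⟩)
        have hPalD_p : PalD pat pN := by
          unfold PalD
          have e : 2 * pN - pat.length = 0 := by omega
          rw [e]
          simp only [List.drop_zero]
          have ht : pat.take (2 * pN) = pat := List.take_of_length_le (by omega)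
          rw [← ht]
          exact hPal
        have hgood : (pat.length : Int) ≤ 2 * ((pN : Nat) : Int) ∧
            pvGoodB pat o ((pN : Nat) : Int) = true := by
          refine ⟨by push_cast; omega, ?_⟩
          unfold pvGoodB
          rw [show pvAltCheck pat (pat.length : Int) ((pN : Nat) : Int) = true from
            (pvAltCheck_bot pat pN (by omega) hpn).mpr hPalD_p, Bool.and_true,
            beq_eq_false_iff_ne.mpr hne]
          rfl
        have hqlep := pvBF_min pat o _ hbf ((pN : Nat) : Int) (by omega) (by push_cast; omega) hgood
        have hqe : qN = pN := by omega
        rw [hqe]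
  · rw [if_neg hHL]
theorem find_row_symmetry_changed : Claim_changed_find_row_symmetry := by
  unfold Claim_changed_find_row_symmetry; decide
theorem find_row_symmetry_tight : Claim_exact_find_row_symmetry := by
  intro pat o hDom hD
  obtain ⟨hHL, ⟨pN, hp1, h2p, hPal, hne⟩, ⟨qN, hq2, hqn, hPalD, hneq⟩⟩ := (pvD_iff pat o).mp hD
  intro hAB
  rw [pvA_eq, pvB_eq, if_pos hHL] at hAB
  have hgoodT : pvGoodB pat o ((pN : Nat) : Int) = true := by
    unfold pvGoodB
    rw [show pvAltCheck pat (pat.length : Int) ((pN : Nat) : Int) = true from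
      (pvAltCheck_top pat pN hp1 (by omega)).mpr hPal, Bool.and_true,
      beq_eq_false_iff_ne.mpr hne]
    rfl
  have htf : ∃ p, pvTF pat o = some p := by
    cases htfc : pvTF pat o with
    | some p => exact ⟨p, rfl⟩
    | none =>
      exfalso
      unfold pvTF at htfc
      rw [List.find?_eq_none] at htfc
      refine htfc ((pN : Nat) : Int) (by rw [PySem.List.mem_pyRange_one]; omega) ?_
      rw [decide_eq_true (by push_cast; omega : 2 * ((pN : Nat) : Int) ≤ (pat.length : Int)),
        Bool.true_and]
      exact hgoodT
  obtain ⟨p, htf⟩ := htf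
  have hbfs : ∃ q, pvBF pat o = some q := by
    cases hbfc : pvBF pat o with
    | some q => exact ⟨q, rfl⟩
    | none =>
      exfalso
      unfold pvBF at hbfc
      rw [List.find?_eq_none] at hbfc
      refine hbfc ((qN : Nat) : Int) (by rw [PySem.List.mem_pyRange_one]; omega) ?_
      rw [decide_eq_true (by push_cast; omega : (pat.length : Int) ≤ 2 * ((qN : Nat) : Int)),
        Bool.true_and]
      unfold pvGoodB
      rw [show pvAltCheck pat (pat.length : Int) ((qN : Nat) : Int) = true from
        (pvAltCheck_bot pat qN hq2 hqn).mpr hPalD, Bool.and_true,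
        beq_eq_false_iff_ne.mpr hneq]
      rfl
  obtain ⟨q, hbf⟩ := hbfs
  simp only [htf, hbf] at hAB
  have hqp : q = p := Option.some.inj hAB
  have hple := pvTF_min pat o p htf ((pN : Nat) : Int) (by omega) (by push_cast; omega)
    ⟨by push_cast; omega, hgoodT⟩
  obtain ⟨qN2, rfl, hq22, hqn2, -, -⟩ := pvBF_some_bot pat o q hbf
  omega
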